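-- pv_equiv track=rewrite | github.com/phousanakhan/Algorithm | validSudoku/validSudoku.py | threeCheck
-- ===== SOURCE A (Python) =====
-- def threeCheck(board):
--     dict0 = {}
--     for i in board:
--         for j in i:
--             if j != ".":
--                 if j in dict0:
--                     return(False)
--                 else:
--                     dict0[j] = 1
--     return(True)
-- ===== SOURCE B (Python) =====
-- def threeCheck(board):
--     vals = sorted(j for row in board for j in row if j != ".")
--     return all(a != b for a, b in zip(vals, vals[1:]))
-- ===== Notes on version B (the rewrite author's own statement) =====
-- stated objective: alternative
-- what changed: B detects duplicates by sorting the flattened non-'.' values and scanning adjacent pairs for equality, instead of A's incremental dict-membership scan with an early return.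
import Mathlib
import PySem

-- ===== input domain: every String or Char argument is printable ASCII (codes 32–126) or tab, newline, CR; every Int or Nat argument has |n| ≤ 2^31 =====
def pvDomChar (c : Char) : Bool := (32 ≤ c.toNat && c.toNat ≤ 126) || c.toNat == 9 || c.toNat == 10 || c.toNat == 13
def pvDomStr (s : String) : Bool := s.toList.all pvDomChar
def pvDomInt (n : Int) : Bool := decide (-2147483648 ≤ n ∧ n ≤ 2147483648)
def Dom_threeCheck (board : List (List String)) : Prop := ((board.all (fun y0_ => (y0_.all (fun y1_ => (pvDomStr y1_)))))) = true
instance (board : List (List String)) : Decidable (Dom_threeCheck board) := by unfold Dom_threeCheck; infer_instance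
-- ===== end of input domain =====

-- ===== PORT A =====
-- B sorts the flattened non-'.' values and scans adjacent pairs for equality, instead of A's dict-membership scan (objective: alternative).
-- inner 'for j in i' loop of A, with the dict state; 'none' models the early 'return False'
def threeCheckCell (d : PySem.Dict String Int) : List String → Option (PySem.Dict String Int)
  | [] => some d
  | j :: rest =>
    if j ≠ "." then
      if d.contains j then none
      else threeCheckCell (d.insert j 1) rest
    else threeCheckCell d rest

-- outer 'for i in board' loop of A
def threeCheckRows (d : PySem.Dict String Int) : List (List String) → Bool
  | [] => true
  | i :: rest =>
    match threeCheckCell d i with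
    | none => false
    | some d' => threeCheckRows d' rest

def threeCheck (board : List (List String)) : Bool :=
  threeCheckRows PySem.Dict.empty board

-- ===== PORT B =====
def threeCheck_alt (board : List (List String)) : Bool :=
  let vals := PySem.List.sorted (board.flatMap (fun row => row.filter (fun j => j ≠ "."))) (fun x => x) false
  (vals.zip (PySem.List.slice vals (some 1) none)).all (fun p => p.1 ≠ p.2)

-- ===== PRECONDITION & SPEC =====
def Spec_threeCheck (board : List (List String)) (out : Bool) : Prop := out = threeCheck_alt board
instance (board : List (List String)) (out : Bool) : Decidable (Spec_threeCheck board out) := by unfold Spec_threeCheck; infer_instance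

-- ===== CLAIM (what is proved, stated in full; the proofs are below) =====
def Claim_equal_threeCheck : Prop := ∀ (board : List (List String)), Dom_threeCheck board → Spec_threeCheck board (threeCheck board)

-- ===== LEMMAS AND PROOFS =====

-- characterisation of A's inner loop
lemma cell_spec (cells : List String) (d : PySem.Dict String Int) (hd : d.keys.Nodup) :
    (if (d.keys ++ cells.filter (fun j => j ≠ ".")).Nodup then
      ∃ d', threeCheckCell d cells = some d' ∧
            d'.keys = d.keys ++ cells.filter (fun j => j ≠ ".") ∧ d'.keys.Nodup
    else threeCheckCell d cells = none) := by
  induction cells generalizing d with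
  | nil => simp [threeCheckCell, hd]
  | cons j rest ih =>
    by_cases hj : j = "."
    · simpa [threeCheckCell, hj] using ih d hd
    · have hfc : (j :: rest).filter (fun j => j ≠ ".") = j :: rest.filter (fun j => j ≠ ".") := by
        simp [hj]
      rw [hfc]
      by_cases hmem : d.contains j = true
      · have hjk : j ∈ d.keys := (PySem.Dict.contains_iff_mem_keys d j).1 hmem
        rw [if_neg (fun hnd => (List.disjoint_of_nodup_append hnd) hjk (by simp))]
        simp [threeCheckCell, hj, hmem]
      · have hjk : j ∉ d.keys := fun h => hmem ((PySem.Dict.contains_iff_mem_keys d j).2 h)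
        have hkeys : (d.insert j 1).keys = d.keys ++ [j] :=
          PySem.Dict.keys_insert_of_not_contains d 1 (by simpa using hmem)
        have hnd' : (d.insert j 1).keys.Nodup := by
          rw [hkeys, List.nodup_append]
          refine ⟨hd, List.nodup_singleton j, ?_⟩
          intro a ha b hb
          rw [List.mem_singleton] at hb
          subst hb
          exact fun h => hjk (h ▸ ha)
        have hstep : threeCheckCell d (j :: rest) = threeCheckCell (d.insert j 1) rest := by
          simp [threeCheckCell, hj, hmem]
        have h2 := ih (d.insert j 1) hnd'
        rw [hkeys, List.append_assoc, List.singleton_append] at h2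
        rw [hstep]
        exact h2

-- characterisation of A's outer loop
lemma rows_spec (rows : List (List String)) (d : PySem.Dict String Int) (hd : d.keys.Nodup) :
    threeCheckRows d rows =
      decide ((d.keys ++ rows.flatMap (fun i => i.filter (fun j => j ≠ "."))).Nodup) := by
  induction rows generalizing d with
  | nil => simp [threeCheckRows, hd]
  | cons i rest ih =>
    have hc := cell_spec i d hd
    rw [List.flatMap_cons, ← List.append_assoc]
    by_cases h : (d.keys ++ i.filter (fun j => j ≠ ".")).Nodup
    · rw [if_pos h] at hc
      obtain ⟨d', heq, hkeys, hnd'⟩ := hc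
      rw [threeCheckRows, heq]
      show threeCheckRows d' rest = _
      rw [ih d' hnd', hkeys]
    · rw [if_neg h] at hc
      rw [threeCheckRows, hc]
      show false = _
      have hbig : ¬ ((d.keys ++ i.filter (fun j => j ≠ ".")) ++
          rest.flatMap (fun i => i.filter (fun j => j ≠ "."))).Nodup :=
        fun hnd => h (hnd.sublist (List.sublist_append_left _ _))
      symm
      rw [decide_eq_false_iff_not]
      simpa using hbig

-- on a weakly increasing list, adjacent distinctness is exactly Nodup
lemma adj_ne_of_sorted (l : List String) (h : l.Pairwise (· ≤ ·)) :
    ((l.zip l.tail).all (fun p => p.1 ≠ p.2)) = decide l.Nodup := by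
  induction l with
  | nil => simp
  | cons a t ih =>
    cases t with
    | nil => simp
    | cons b t2 =>
      have hab : a ≤ b := (List.pairwise_cons.1 h).1 b (by simp)
      have hb : ∀ x ∈ t2, b ≤ x :=
        fun x hx => (List.pairwise_cons.1 (List.pairwise_cons.1 h).2).1 x hx
      have ih2 := ih (List.pairwise_cons.1 h).2
      by_cases hne : a = b
      · subst hne
        simp
      · have hnotmem : a ∉ b :: t2 := by
          intro hmem
          rcases List.mem_cons.1 hmem with h1 | h2
          · exact hne h1
          · exact hne (le_antisymm hab (hb a h2))
        simp only [ne_eq, List.tail_cons, decide_not] at ih2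
        simp only [List.tail_cons, List.zip_cons_cons, List.all_cons, ne_eq, decide_not]
        rw [ih2]
        simp [hne, hnotmem]

-- ===== VERDICT (by name: the statement is the Claim_ definition above) =====
theorem threeCheck_spec : Claim_equal_threeCheck := by
  intro board _
  unfold Spec_threeCheck
  set flat := board.flatMap (fun i => i.filter (fun j => j ≠ ".")) with hflat
  have hA : threeCheck board = decide flat.Nodup := by
    rw [threeCheck, rows_spec board PySem.Dict.empty (by simp), PySem.Dict.keys_empty,
      List.nil_append]
  have hB : threeCheck_alt board = decide flat.Nodup := by
    show ((PySem.List.sorted flat (fun x => x) false).zip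
        (PySem.List.slice (PySem.List.sorted flat (fun x => x) false) (some 1) none)).all
        (fun p => p.1 ≠ p.2) = decide flat.Nodup
    rw [PySem.List.slice_from_one,
      adj_ne_of_sorted _ (PySem.List.sorted_pairwise flat (fun x => x))]
    exact decide_eq_decide.2 (PySem.List.sorted_perm flat (fun x => x) false).nodup_iff
  rw [hA, hB]
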